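-- pv_equiv track=rewrite | github.com/blue-sky-r/Advent-Of-Code | 2023/13/u13.py | parse_patterns
-- ===== SOURCE A (Python) =====
-- def parse_patterns(input: list) -> list:
--     """ nuild list of patterns """
--     patterns, pattern = [], []
--     for line in input:
--         if not line:
--             if pattern:
--                 patterns.append(pattern)
--                 pattern = []
--             continue
--         pattern.append(line)
--     if pattern:
--         patterns.append(pattern)
--     return patterns
-- ===== SOURCE B (Python) =====
-- from itertools import groupby
--
-- def parse_patterns(input: list) -> list:
--     """build list of patterns"""
--     return [list(g) for k, g in groupby(input, key=bool) if k]
-- ===== Notes on version B (the rewrite author's own statement) =====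
-- stated objective: idiomatic
-- what changed: Replaces the manual accumulator-and-flush loop with a single itertools.groupby pass keyed on truthiness, keeping only the truthy runs.
import Mathlib
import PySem

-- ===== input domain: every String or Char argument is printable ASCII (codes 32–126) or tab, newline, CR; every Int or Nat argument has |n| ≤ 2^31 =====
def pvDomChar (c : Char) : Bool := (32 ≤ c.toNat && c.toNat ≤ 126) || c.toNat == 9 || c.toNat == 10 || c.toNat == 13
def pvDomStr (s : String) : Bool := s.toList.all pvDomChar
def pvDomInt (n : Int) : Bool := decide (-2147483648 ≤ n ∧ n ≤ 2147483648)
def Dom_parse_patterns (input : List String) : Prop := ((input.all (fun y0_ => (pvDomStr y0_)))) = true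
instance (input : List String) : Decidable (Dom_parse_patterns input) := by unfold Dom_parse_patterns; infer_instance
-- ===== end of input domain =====

-- B replaces A's manual accumulator-and-flush loop with a groupby pass over truthiness runs (idiomatic; same cost).

-- ===== PORT A =====
-- loop body: 'if not line: (flush pattern if nonempty) else: pattern.append(line)'
def pvStepA (st : List (List String) × List String) (line : String) :
    List (List String) × List String :=
  if line = "" then
    (if st.2 ≠ [] then (st.1 ++ [st.2], ([] : List String)) else st)
  else
    (st.1, st.2 ++ [line])

-- the trailing 'if pattern: patterns.append(pattern)'
def pvFlush (st : List (List String) × List String) : List (List String) :=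
  if st.2 ≠ [] then st.1 ++ [st.2] else st.1

def parse_patterns (input : List String) : List (List String) :=
  pvFlush (input.foldl pvStepA (([] : List (List String)), ([] : List String)))

-- ===== PORT B =====
-- groupby(input, key=bool): the run of consecutive lines with the same key (truthiness), and the rest
def pvRun (k : Bool) : List String → List String × List String
  | [] => ([], [])
  | x :: xs =>
    if decide (x ≠ "") = k then
      let p := pvRun k xs
      (x :: p.1, p.2)
    else ([], x :: xs)

theorem pvRun_len (k : Bool) (xs : List String) : (pvRun k xs).2.length ≤ xs.length := by
  induction xs with
  | nil => simp [pvRun]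
  | cons x xs ih =>
    simp only [pvRun]
    split
    · simpa using Nat.le_succ_of_le ih
    · simp

-- [list(g) for k, g in groupby(input, key=bool) if k]
def parse_patterns_alt (input : List String) : List (List String) :=
  match input with
  | [] => []
  | x :: xs =>
    let k := decide (x ≠ "")
    let p := pvRun k xs
    (if k then [x :: p.1] else []) ++ parse_patterns_alt p.2
termination_by input.length
decreasing_by
  simpa using Nat.lt_succ_of_le (pvRun_len _ _)

-- ===== PRECONDITION & SPEC =====
def Spec_parse_patterns (input : List String) (out : List (List String)) : Prop := out = parse_patterns_alt input
instance (input : List String) (out : List (List String)) : Decidable (Spec_parse_patterns input out) := by unfold Spec_parse_patterns; infer_instance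

-- ===== CLAIM (what is proved, stated in full; the proofs are below) =====
def Claim_equal_parse_patterns : Prop := ∀ (input : List String), Dom_parse_patterns input → Spec_parse_patterns input (parse_patterns input)

-- ===== LEMMAS AND PROOFS =====

-- "continue A's loop from patterns [] and current pattern pat, then flush"
def pvAux (pat : List String) (l : List String) : List (List String) :=
  pvFlush (l.foldl pvStepA (([] : List (List String)), pat))

-- accumulated patterns are only ever appended to: the prefix factors out of the fold
theorem pvFold_prefix (l : List String) (ps : List (List String)) (pat : List String) :
    l.foldl pvStepA (ps, pat)
      = (ps ++ (l.foldl pvStepA ([], pat)).1, (l.foldl pvStepA ([], pat)).2) := by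
  induction l generalizing ps pat with
  | nil => simp
  | cons x l ih =>
    simp only [List.foldl_cons]
    by_cases hx : x = ""
    · by_cases hp : pat = []
      · have e1 : pvStepA (ps, pat) x = (ps, pat) := by simp [pvStepA, hx, hp]
        have e2 : pvStepA (([] : List (List String)), pat) x = ([], pat) := by
          simp [pvStepA, hx, hp]
        rw [e1, e2]; exact ih ps pat
      · have e1 : pvStepA (ps, pat) x = (ps ++ [pat], []) := by simp [pvStepA, hx, hp]
        have e2 : pvStepA (([] : List (List String)), pat) x = ([pat], []) := by
          simp [pvStepA, hx, hp]
        rw [e1, e2, ih (ps ++ [pat]) [], ih [pat] []]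
        simp
    · have e1 : pvStepA (ps, pat) x = (ps, pat ++ [x]) := by simp [pvStepA, hx]
      have e2 : pvStepA (([] : List (List String)), pat) x = ([], pat ++ [x]) := by
        simp [pvStepA, hx]
      rw [e1, e2]; exact ih ps (pat ++ [x])

theorem pvFlush_append (ps : List (List String)) (a : List (List String) × List String) :
    pvFlush (ps ++ a.1, a.2) = ps ++ pvFlush a := by
  obtain ⟨q, b⟩ := a
  unfold pvFlush
  split <;> simp_all

theorem pvAux_from (l : List String) (ps : List (List String)) (pat : List String) :
    pvFlush (l.foldl pvStepA (ps, pat)) = ps ++ pvAux pat l := by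
  rw [pvFold_prefix]
  exact pvFlush_append ps _

-- one loop step of A, seen from pvAux
theorem pvAux_step_flush (l : List String) (pat : List String) (hp : pat ≠ []) :
    pvAux pat ("" :: l) = [pat] ++ pvAux [] l := by
  show pvFlush (("" :: l).foldl pvStepA ([], pat)) = [pat] ++ pvAux [] l
  have e : pvStepA (([] : List (List String)), pat) "" = ([pat], []) := by
    simp [pvStepA, hp]
  rw [List.foldl_cons, e]
  exact pvAux_from l [pat] []

theorem pvAux_step_skip (l : List String) :
    pvAux [] ("" :: l) = pvAux [] l := by
  show pvFlush (("" :: l).foldl pvStepA ([], [])) = pvAux [] l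
  have e : pvStepA (([] : List (List String)), ([] : List String)) "" = ([], []) := by
    simp [pvStepA]
  rw [List.foldl_cons, e]
  rfl

theorem pvAux_step_take (l : List String) (pat : List String) (x : String) (hx : x ≠ "") :
    pvAux pat (x :: l) = pvAux (pat ++ [x]) l := by
  show pvFlush ((x :: l).foldl pvStepA ([], pat)) = pvAux (pat ++ [x]) l
  have e : pvStepA (([] : List (List String)), pat) x = ([], pat ++ [x]) := by
    simp [pvStepA, hx]
  rw [List.foldl_cons, e]
  rfl

-- a nonempty current pattern absorbs the whole truthy run, then flushes
theorem pvAux_run (l : List String) (pat : List String) (hp : pat ≠ []) :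
    pvAux pat l = [pat ++ (pvRun true l).1] ++ pvAux [] (pvRun true l).2 := by
  induction l generalizing pat with
  | nil => simp [pvAux, pvFlush, pvRun, hp]
  | cons x l ih =>
    by_cases hx : x = ""
    · subst hx
      rw [pvAux_step_flush l pat hp]
      simp [pvRun, pvAux_step_skip]
    · rw [pvAux_step_take l pat x hx, ih (pat ++ [x]) (by simp)]
      simp [pvRun, hx]

-- with an empty current pattern, A skips the falsy run line by line
theorem pvAux_skip (l : List String) :
    pvAux [] (pvRun false l).2 = pvAux [] l := by
  induction l with
  | nil => rfl
  | cons x l ih =>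
    by_cases hx : x = ""
    · subst hx
      rw [pvAux_step_skip l, ← ih]
      simp [pvRun]
    · simp [pvRun, hx]

-- B skips the whole falsy run at once, to the same effect
theorem pvAlt_skip (l : List String) :
    parse_patterns_alt (pvRun false l).2 = parse_patterns_alt l := by
  cases l with
  | nil => rfl
  | cons x l =>
    by_cases hx : x = ""
    · subst hx
      conv_rhs => rw [parse_patterns_alt]
      simp [pvRun]
    · simp [pvRun, hx]

theorem pvAux_eq_alt : ∀ (l : List String), pvAux [] l = parse_patterns_alt l
  | [] => by simp [pvAux, pvFlush, parse_patterns_alt]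
  | x :: xs => by
    by_cases hx : x = ""
    · subst hx
      rw [pvAux_step_skip xs, ← pvAux_skip xs, pvAux_eq_alt (pvRun false xs).2, pvAlt_skip]
      conv_rhs => rw [parse_patterns_alt]
      simp [pvAlt_skip]
    · have s : pvAux [] (x :: xs) = pvAux [x] xs := pvAux_step_take xs [] x hx
      rw [s, pvAux_run xs [x] (by simp), pvAux_eq_alt (pvRun true xs).2]
      conv_rhs => rw [parse_patterns_alt]
      simp [hx]
termination_by l => l.length
decreasing_by
  all_goals simpa using Nat.lt_succ_of_le (pvRun_len _ _)

-- ===== VERDICT (by name: the statement is the Claim_ definition above) =====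
theorem parse_patterns_spec : Claim_equal_parse_patterns := by
  intro input _
  show parse_patterns input = parse_patterns_alt input
  rw [show parse_patterns input = pvAux [] input from rfl, pvAux_eq_alt]
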